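-- pv_equiv track=rewrite | github.com/SAG145/Project-Euler | PEP828 - Numbers Challenge.py | sub_to_index
-- ===== SOURCE A (Python) =====
-- import copy
--
-- def sub_to_index(lst,sub):
--     sub1 = copy.copy(sub)
--     l = len(lst)
--     i = 0
--     for k in range(len(lst)):
--         if lst[k] in sub1:
--             sub1.remove(lst[k])
--             i += 2**(l - k - 1)
--     return i
-- ===== SOURCE B (Python) =====
-- def sub_to_index(lst, sub):
--     positions = {}
--     for k, v in enumerate(lst):
--         positions[v] = positions.get(v, []) + [k]
--     count = {}
--     for v in sub:
--         count[v] = count.get(v, 0) + 1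
--     l = len(lst)
--     total = 0
--     for v, c in count.items():
--         for k in positions.get(v, [])[:c]:
--             total += 2 ** (l - k - 1)
--     return total
-- ===== Notes on version B (the rewrite author's own statement) =====
-- stated objective: alternative
-- what changed: Instead of scanning lst while consuming a mutable copy of sub via membership tests and remove(), B builds an index-position dict for lst and a counts dict for sub in single passes and, per distinct value v, marks the first count[v] positions of v, summing their MSB-first weights.
import Mathlib
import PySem

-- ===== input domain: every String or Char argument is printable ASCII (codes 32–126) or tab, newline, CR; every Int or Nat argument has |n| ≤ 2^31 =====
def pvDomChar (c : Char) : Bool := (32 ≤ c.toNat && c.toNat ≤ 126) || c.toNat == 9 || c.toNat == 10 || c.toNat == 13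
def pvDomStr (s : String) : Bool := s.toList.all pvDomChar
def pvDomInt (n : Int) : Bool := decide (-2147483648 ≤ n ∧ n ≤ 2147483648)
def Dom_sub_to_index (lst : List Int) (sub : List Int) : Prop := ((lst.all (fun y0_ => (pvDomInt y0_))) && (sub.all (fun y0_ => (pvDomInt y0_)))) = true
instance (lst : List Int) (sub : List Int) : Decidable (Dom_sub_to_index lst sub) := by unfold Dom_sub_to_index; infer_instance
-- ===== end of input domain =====

-- B replaces A's scan-with-mutable-copy (membership + remove over a shrinking copy of sub)
-- by two single-pass dicts (positions of each value in lst, counts of sub) and a per-value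
-- selection of the first count[v] positions; equal return value proved for all inputs.


-- ===== PORT A =====
-- literal port of A: copy sub, loop k over range(len(lst)); if lst[k] in sub1,
-- remove its first occurrence and add 2**(l-k-1)
def sub_to_index (lst : List Int) (sub : List Int) : Int :=
  let sub1 := sub
  let l : Int := lst.length
  let st := (PySem.List.pyRange 0 l 1).foldl (fun (st : List Int × Int) k =>
    if st.1.contains (PySem.List.pyGetD lst k 0) then
      ((PySem.List.remove? st.1 (PySem.List.pyGetD lst k 0)).getD st.1,
        st.2 + 2 ^ ((l - k - 1).toNat))
    else st) (sub1, 0)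
  st.2

-- ===== PORT B =====
-- literal port of B: positions dict (value -> list of its indices), counts dict of sub,
-- then per (v, c) in counts sum the weights of the first c positions of v
def sub_to_index_alt (lst : List Int) (sub : List Int) : Int :=
  let positions : PySem.Dict Int (List Int) :=
    (PySem.List.enumerate lst 0).foldl
      (fun d p => d.modify p.2 [] (fun xs => xs ++ [p.1])) PySem.Dict.empty
  let count : PySem.Dict Int Int :=
    sub.foldl (fun d v => d.modify v 0 (fun c => c + 1)) PySem.Dict.empty
  let l : Int := lst.length
  count.items.foldl (fun total p =>
    (PySem.List.slice (positions.getD p.1 []) none (some p.2)).foldl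
      (fun total k => total + 2 ^ ((l - k - 1).toNat)) total) 0

-- ===== PRECONDITION & SPEC =====
def Spec_sub_to_index (lst : List Int) (sub : List Int) (out : Int) : Prop := out = sub_to_index_alt lst sub
instance (lst : List Int) (sub : List Int) (out : Int) : Decidable (Spec_sub_to_index lst sub out) := by unfold Spec_sub_to_index; infer_instance

-- ===== CLAIM (what is proved, stated in full; the proofs are below) =====
def Claim_equal_sub_to_index : Prop := ∀ (lst : List Int) (sub : List Int), Dom_sub_to_index lst sub → Spec_sub_to_index lst sub (sub_to_index lst sub)

-- ===== LEMMAS AND PROOFS =====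

def pvW (lst : List Int) (k : Nat) : Int := 2 ^ (((lst.length : Int) - (k : Int) - 1).toNat)

def pvCond (lst : List Int) (sub : List Int) (k : Nat) : Bool :=
  (lst.take k).count (lst.getD k 0) < sub.count (lst.getD k 0)

def pvSpecSum (lst : List Int) (sub : List Int) (n : Nat) : Int :=
  ((List.range n).map (fun k => if pvCond lst sub k then pvW lst k else 0)).sum

theorem aInv (lst sub : List Int) (n : Nat) (hn : n ≤ lst.length) :
    ∃ s : List Int,
      (List.range n).foldl (fun (st : List Int × Int) (k : Nat) =>
        if st.1.contains (lst.getD k 0) then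
          ((PySem.List.remove? st.1 (lst.getD k 0)).getD st.1, st.2 + pvW lst k)
        else st) (sub, 0)
      = (s, pvSpecSum lst sub n)
      ∧ ∀ v, s.count v = sub.count v - min (sub.count v) ((lst.take n).count v) := by
  induction n with
  | zero => exact ⟨sub, by simp [pvSpecSum], by simp⟩
  | succ n ih =>
    obtain ⟨s, hfold, hcnt⟩ := ih (Nat.le_of_succ_le hn)
    have hnl : n < lst.length := hn
    have hgd : lst.getD n 0 = lst[n] := by
      rw [List.getD_eq_getElem?_getD, List.getElem?_eq_getElem hnl]; rfl
    have htake : lst.take (n+1) = lst.take n ++ [lst[n]] := by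
      rw [List.take_add_one]
      simp [List.getElem?_eq_getElem hnl]
    have hcondiff : pvCond lst sub n = decide ((lst.take n).count lst[n] < sub.count lst[n]) := by
      simp only [pvCond, hgd]
    have hmem : (s.contains (lst.getD n 0)) = pvCond lst sub n := by
      have h := hcnt lst[n]
      rw [hgd, hcondiff]
      rcases Nat.lt_or_ge ((lst.take n).count lst[n]) (sub.count lst[n]) with hc | hc
      · simp only [List.contains_eq_mem, ← List.count_pos_iff,
          decide_eq_true (by omega : 0 < s.count lst[n]), decide_eq_true hc]
      · have : s.count lst[n] = 0 := by omega
        simp only [List.contains_eq_mem, ← List.count_pos_iff, this]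
        simp; omega
    have hsum : pvSpecSum lst sub (n+1) =
        pvSpecSum lst sub n + (if pvCond lst sub n then pvW lst n else 0) := by
      simp [pvSpecSum, List.range_succ]
    rw [List.range_succ, List.foldl_append, hfold]
    simp only [List.foldl_cons, List.foldl_nil, hmem]
    by_cases hc : (lst.take n).count lst[n] < sub.count lst[n]
    · have hcd : pvCond lst sub n = true := by rw [hcondiff]; exact decide_eq_true hc
      rw [hcd]
      have hx : lst.getD n 0 ∈ s := by
        have h := hcnt lst[n]
        rw [hgd, ← List.count_pos_iff]; omega
      simp only [if_true, PySem.List.remove?_eq_some_erase s _ hx, Option.getD_some]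
      refine ⟨s.erase (lst.getD n 0), by rw [hsum, hcd, if_pos rfl], ?_⟩
      intro v
      have h1 := hcnt v
      have h2 := hcnt lst[n]
      rw [List.count_erase, hgd, htake, List.count_append]
      by_cases hv : lst[n] = v
      · subst hv
        simp only [beq_self_eq_true, if_true, List.count_singleton]
        omega
      · rw [if_neg (by simp only [beq_iff_eq]; exact hv), List.count_singleton,
          if_neg (by simp only [beq_iff_eq]; exact fun h => hv h)]
        omega
    · have hcd : pvCond lst sub n = false := by
        rw [hcondiff]; exact decide_eq_false hc
      rw [hcd]
      refine ⟨s, by rw [hsum, hcd]; simp, ?_⟩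
      intro v
      have h1 := hcnt v
      have h2 := hcnt lst[n]
      rw [htake, List.count_append]
      by_cases hv : lst[n] = v
      · subst hv
        simp only [List.count_singleton]
        omega
      · rw [List.count_singleton,
          if_neg (by simp only [beq_iff_eq]; exact fun h => hv h)]
        omega

theorem a_eq_spec (lst sub : List Int) :
    sub_to_index lst sub = pvSpecSum lst sub lst.length := by
  obtain ⟨s, hfold, -⟩ := aInv lst sub lst.length le_rfl
  show ((PySem.List.pyRange 0 (lst.length:Int) 1).foldl (fun (st : List Int × Int) k =>
    if st.1.contains (PySem.List.pyGetD lst k 0) then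
      ((PySem.List.remove? st.1 (PySem.List.pyGetD lst k 0)).getD st.1,
        st.2 + 2 ^ (((lst.length:Int) - k - 1).toNat))
    else st) (sub, 0)).2 = pvSpecSum lst sub lst.length
  rw [PySem.List.pyRange_zero_nat, List.foldl_map]
  have hb : (fun (st : List Int × Int) (k : Nat) =>
      if st.1.contains (PySem.List.pyGetD lst (↑k) 0) then
        ((PySem.List.remove? st.1 (PySem.List.pyGetD lst (↑k) 0)).getD st.1,
          st.2 + 2 ^ (((lst.length:Int) - (↑k:Int) - 1).toNat))
      else st)
      = (fun (st : List Int × Int) (k : Nat) =>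
        if st.1.contains (lst.getD k 0) then
          ((PySem.List.remove? st.1 (lst.getD k 0)).getD st.1, st.2 + pvW lst k)
        else st) := by
    funext st k
    rw [PySem.List.pyGetD_natCast]
    rfl
  rw [hb, hfold]

theorem enum_eq (lst : List Int) :
    PySem.List.enumerate lst 0
      = (List.range lst.length).map (fun (k : Nat) => ((k:Int), lst.getD k 0)) := by
  rw [PySem.List.enumerate_eq_map_pyRange lst 0]
  rw [(by simp [PySem.List.len_eq] : PySem.List.len lst = (lst.length : Int)),
    PySem.List.pyRange_zero_nat, List.map_map]
  exact List.map_congr_left (fun k _ => by simp [PySem.List.pyGetD_natCast])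

theorem posGetD (lst : List Int) (v : Int) :
    ((PySem.List.enumerate lst 0).foldl
      (fun d p => d.modify p.2 [] (fun xs => xs ++ [p.1])) PySem.Dict.empty).getD v []
    = ((List.range lst.length).filter (fun k => lst.getD k 0 == v)).map (fun (k : Nat) => (k : Int)) := by
  rw [enum_eq, List.foldl_map]
  have h := PySem.Dict.getD_foldl_modify_append
    ((List.range lst.length).map (fun (k : Nat) => (lst.getD k 0, (k:Int)))) PySem.Dict.empty v
  rw [List.foldl_map] at h
  rw [h]
  simp only [List.filter_map, Function.comp_def, PySem.Dict.getD_empty, List.map_map,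
    List.nil_append]

theorem sum_map_ite_eq (V : List Int) (hnd : V.Nodup) (x : Int) (c : Int) (hx : x ∈ V) :
    (V.map (fun v => if v = x then c else 0)).sum = c := by
  induction V with
  | nil => cases hx
  | cons y V ih =>
    simp only [List.map_cons, List.sum_cons]
    by_cases h : y = x
    · subst h
      rw [if_pos rfl]
      have hz : (V.map (fun v => if v = y then c else 0)).sum = 0 := by
        apply List.sum_eq_zero
        intro z hz
        obtain ⟨v, hv, rfl⟩ := List.mem_map.mp hz
        exact if_neg (fun he => (List.nodup_cons.mp hnd).1 (by rw [← he]; exact hv))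
      rw [hz, add_zero]
    · rw [if_neg h, zero_add]
      have hxV : x ∈ V := by
        rcases List.mem_cons.mp hx with rfl | hm
        · exact absurd rfl h
        · exact hm
      exact ih (List.nodup_cons.mp hnd).2 hxV

theorem regroup (lst sub : List Int) (n : Nat) (hn : n ≤ lst.length) :
    ((PySem.Set.ofList sub).map (fun v =>
        (((List.range n).filter (fun k =>
            lst.getD k 0 == v && decide ((lst.take k).count v < sub.count v))).map (pvW lst)).sum)).sum
    = pvSpecSum lst sub n := by
  induction n with
  | zero => simp [pvSpecSum]
  | succ n ih =>
    have hn' : n ≤ lst.length := Nat.le_of_succ_le hn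
    have hstep : ∀ v : Int,
        (((List.range (n+1)).filter (fun k =>
            lst.getD k 0 == v && decide ((lst.take k).count v < sub.count v))).map (pvW lst)).sum
        = (((List.range n).filter (fun k =>
            lst.getD k 0 == v && decide ((lst.take k).count v < sub.count v))).map (pvW lst)).sum
          + (if lst.getD n 0 = v ∧ (lst.take n).count v < sub.count v then pvW lst n else 0) := by
      intro v
      rw [List.range_succ, List.filter_append, List.map_append, List.sum_append]
      congr 1
      by_cases h : lst.getD n 0 = v ∧ (lst.take n).count v < sub.count v
      · have hb : (lst.getD n 0 == v && decide ((lst.take n).count v < sub.count v)) = true := by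
          simp only [h.1, beq_self_eq_true, decide_eq_true h.2, Bool.and_self]
        rw [if_pos h]
        have hf : (List.filter (fun k =>
            lst.getD k 0 == v && decide ((lst.take k).count v < sub.count v)) [n]) = [n] := by
          simp only [List.filter_cons, List.filter_nil, hb, if_true]
        rw [hf]
        simp
      · have hb : (lst.getD n 0 == v && decide ((lst.take n).count v < sub.count v)) = false := by
          rcases Decidable.not_and_iff_not_or_not.mp h with h1 | h1
          · exact Bool.and_eq_false_iff.mpr (Or.inl (beq_eq_false_iff_ne.mpr h1))
          · exact Bool.and_eq_false_iff.mpr (Or.inr (decide_eq_false h1))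
        rw [if_neg h]
        have hf : (List.filter (fun k =>
            lst.getD k 0 == v && decide ((lst.take k).count v < sub.count v)) [n]) = [] := by
          simp only [List.filter_cons, List.filter_nil, hb, Bool.false_eq_true, if_false]
        rw [hf]
        simp
    have hps : pvSpecSum lst sub (n+1) =
        pvSpecSum lst sub n + (if pvCond lst sub n then pvW lst n else 0) := by
      simp [pvSpecSum, List.range_succ]
    calc ((PySem.Set.ofList sub).map _).sum
        = ((PySem.Set.ofList sub).map (fun v =>
            (((List.range n).filter (fun k =>
                lst.getD k 0 == v && decide ((lst.take k).count v < sub.count v))).map (pvW lst)).sum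
            + (if lst.getD n 0 = v ∧ (lst.take n).count v < sub.count v then pvW lst n else 0))).sum := by
          exact congrArg _ (List.map_congr_left (fun v _ => hstep v))
      _ = pvSpecSum lst sub n
            + ((PySem.Set.ofList sub).map (fun v =>
                if lst.getD n 0 = v ∧ (lst.take n).count v < sub.count v then pvW lst n else 0)).sum := by
          rw [PySem.List.sum_map_add_int, ih hn']
      _ = pvSpecSum lst sub (n+1) := by
          rw [hps]
          congr 1
          by_cases hc : pvCond lst sub n = true
          · rw [hc, if_pos rfl]
            simp only [pvCond, decide_eq_true_eq] at hc
            have hx : lst.getD n 0 ∈ sub := by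
              have : 0 < sub.count (lst.getD n 0) := by omega
              exact List.count_pos_iff.mp this
            have heq : ((PySem.Set.ofList sub).map (fun v =>
                if lst.getD n 0 = v ∧ (lst.take n).count v < sub.count v then pvW lst n else 0))
                = ((PySem.Set.ofList sub).map (fun v =>
                if v = lst.getD n 0 then pvW lst n else 0)) := by
              apply List.map_congr_left
              intro v _
              by_cases hv : v = lst.getD n 0
              · subst hv; rw [if_pos rfl, if_pos ⟨rfl, hc⟩]
              · rw [if_neg hv, if_neg (fun hh => hv hh.1.symm)]
            rw [heq]
            exact sum_map_ite_eq _ (PySem.Set.nodup_ofList sub) _ _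
              ((PySem.Set.mem_ofList sub _).mpr hx)
          · rw [Bool.not_eq_true] at hc
            rw [hc]
            simp only [Bool.false_eq_true, if_false]
            simp only [pvCond, decide_eq_false_iff_not, Nat.not_lt] at hc
            apply List.sum_eq_zero
            intro z hz
            obtain ⟨v, hv, rfl⟩ := List.mem_map.mp hz
            rw [if_neg (fun hh => by rcases hh with ⟨rfl, hlt⟩; omega)]

theorem take_filter_range (p : Nat → Bool) (c n : Nat) :
    ((List.range n).filter p).take c
    = (List.range n).filter (fun k => p k && decide ((((List.range k).filter p).length) < c)) := by
  induction n with
  | zero => simp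
  | succ n ih =>
    rw [List.range_succ, List.filter_append, List.take_append, ih, List.filter_append]
    congr 1
    by_cases hp : p n = true
    · have hf : List.filter p [n] = [n] := by
        simp only [List.filter_cons, List.filter_nil, hp, if_true]
      rw [hf]
      by_cases hlen : ((List.range n).filter p).length < c
      · have h1 : List.take (c - ((List.range n).filter p).length) [n] = [n] :=
          List.take_of_length_le (by simp; omega)
        have h2 : (List.filter (fun k => p k &&
            decide ((((List.range k).filter p).length) < c)) [n]) = [n] := by
          simp only [List.filter_cons, List.filter_nil, hp, decide_eq_true hlen,
            Bool.and_self, if_true]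
        rw [h1, h2]
      · have h1 : c - ((List.range n).filter p).length = 0 := by omega
        have h2 : (List.filter (fun k => p k &&
            decide ((((List.range k).filter p).length) < c)) [n]) = [] := by
          simp only [List.filter_cons, List.filter_nil, hp, decide_eq_false hlen,
            Bool.and_false, Bool.false_eq_true, if_false]
        rw [h1, h2, List.take_zero]
    · rw [Bool.not_eq_true] at hp
      have hf : List.filter p [n] = [] := by
        simp only [List.filter_cons, List.filter_nil, hp, Bool.false_eq_true, if_false]
      have h2 : (List.filter (fun k => p k &&
          decide ((((List.range k).filter p).length) < c)) [n]) = [] := by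
        simp only [List.filter_cons, List.filter_nil, hp, Bool.false_and,
          Bool.false_eq_true, if_false]
      rw [hf, h2]
      simp

theorem len_filter_count (lst : List Int) (v : Int) (k : Nat) (hk : k ≤ lst.length) :
    ((List.range k).filter (fun j => lst.getD j 0 == v)).length = (lst.take k).count v := by
  induction k with
  | zero => simp
  | succ k ih =>
    have hk' : k ≤ lst.length := Nat.le_of_succ_le hk
    have hkl : k < lst.length := hk
    have hgd : lst.getD k 0 = lst[k] := by
      rw [List.getD_eq_getElem?_getD, List.getElem?_eq_getElem hkl]; rfl
    have htake : lst.take (k+1) = lst.take k ++ [lst[k]] := by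
      rw [List.take_add_one]
      simp [List.getElem?_eq_getElem hkl]
    rw [List.range_succ, List.filter_append, List.length_append, ih hk',
      htake, List.count_append]
    congr 1
    by_cases h : lst.getD k 0 = v
    · have hb : (lst.getD k 0 == v) = true := beq_iff_eq.mpr h
      simp only [List.filter_cons, List.filter_nil, hb, if_true, List.length_cons,
        List.length_nil, List.count_singleton]
      rw [← hgd, hb]
      simp
    · have hb : (lst.getD k 0 == v) = false := beq_eq_false_iff_ne.mpr h
      simp only [List.filter_cons, List.filter_nil, hb, Bool.false_eq_true, if_false,
        List.length_nil, List.count_singleton]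
      rw [← hgd, hb]
      simp

theorem b_eq_spec (lst sub : List Int) :
    sub_to_index_alt lst sub = pvSpecSum lst sub lst.length := by
  show ((sub.foldl (fun d v => d.modify v 0 (fun c => c + 1)) PySem.Dict.empty).items.foldl
      (fun (total : Int) (p : Int × Int) =>
        (PySem.List.slice
          (((PySem.List.enumerate lst 0).foldl
              (fun d p => d.modify p.2 [] (fun xs => xs ++ [p.1])) PySem.Dict.empty).getD p.1 [])
          none (some p.2)).foldl
          (fun total k => total + 2 ^ (((lst.length : Int) - k - 1).toNat)) total) 0)
    = pvSpecSum lst sub lst.length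
  rw [← PySem.Dict.counter_eq_foldl, PySem.Dict.items_counter, List.foldl_map]
  have hbody : ∀ (total : Int) (v : Int),
      (PySem.List.slice
          (((PySem.List.enumerate lst 0).foldl
              (fun d p => d.modify p.2 [] (fun xs => xs ++ [p.1])) PySem.Dict.empty).getD v [])
          none (some ((sub.count v : Nat) : Int))).foldl
          (fun total k => total + 2 ^ (((lst.length : Int) - k - 1).toNat)) total
      = total + (((List.range lst.length).filter (fun k =>
            lst.getD k 0 == v && decide ((lst.take k).count v < sub.count v))).map (pvW lst)).sum := by
    intro total v
    rw [posGetD, PySem.List.slice_to_natCast, ← List.map_take,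
      take_filter_range (fun k => lst.getD k 0 == v) (sub.count v) lst.length]
    have hcong : (List.range lst.length).filter (fun k => (lst.getD k 0 == v) &&
          decide ((((List.range k).filter (fun j => lst.getD j 0 == v)).length) < sub.count v))
        = (List.range lst.length).filter (fun k =>
          lst.getD k 0 == v && decide ((lst.take k).count v < sub.count v)) := by
      apply List.filter_congr
      intro k hk
      have hkl : k ≤ lst.length := Nat.le_of_lt (List.mem_range.mp hk)
      rw [len_filter_count lst v k hkl]
    rw [hcong, PySem.List.foldl_add, List.map_map]
    rfl
  show (PySem.Set.ofList sub).foldl (fun (total : Int) (v : Int) =>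
      (PySem.List.slice
        (((PySem.List.enumerate lst 0).foldl
            (fun d p => d.modify p.2 [] (fun xs => xs ++ [p.1])) PySem.Dict.empty).getD v [])
        none (some ((sub.count v : Nat) : Int))).foldl
        (fun total k => total + 2 ^ (((lst.length : Int) - k - 1).toNat)) total) 0
    = pvSpecSum lst sub lst.length
  rw [funext (fun t => funext (fun v => hbody t v)), PySem.List.foldl_add,
    regroup lst sub lst.length le_rfl, zero_add]

-- ===== VERDICT (by name: the statement is the Claim_ definition above) =====
theorem sub_to_index_spec : Claim_equal_sub_to_index := by
  intro lst sub _
  unfold Spec_sub_to_index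
  rw [a_eq_spec, b_eq_spec]
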